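-- pv_equiv track=rewrite | github.com/ZJUSCT/argo-cd.clusters.zjusct.io | packer/debian/packages/sort_packages.py | sorted_output
-- ===== SOURCE A (Python) =====
-- def sorted_output(groups: dict) -> str:
--     out_lines = []
--     for header in sorted(groups.keys(), key=str.casefold):
--         out_lines.append(f"# {header}")
--         # dedupe and sort packages
--         pkgs = sorted(set(groups[header]), key=str.casefold)
--         for p in pkgs:
--             out_lines.append(p)
--         out_lines.append("")
--     # remove trailing blank line
--     if out_lines and out_lines[-1] == "":
--         out_lines.pop()
--     return "\n".join(out_lines) + "\n"
-- ===== SOURCE B (Python) =====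
-- def _insort(xs, x, key):
--     """Insert x into the already-sorted list xs, keeping it sorted by key
--     (stable: x goes after existing entries with an equal key)."""
--     for i, y in enumerate(xs):
--         if key(x) < key(y):
--             return xs[:i] + [x] + xs[i:]
--     return xs + [x]
--
--
-- def sorted_output(groups: dict) -> str:
--     # Maintain everything as sorted structures incrementally (online binary-less
--     # insertion sort), instead of batch sorted()/set() calls plus a pop fix-up.
--     items = []  # (header, sorted deduped packages), kept sorted by casefold(header)
--     for header, pkgs in groups.items():
--         sp = []
--         for p in pkgs:
--             if p not in sp:
--                 sp = _insort(sp, p, str.casefold)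
--         items = _insort(items, (header, sp), lambda kv: kv[0].casefold())
--     out = ""
--     for header, sp in items:
--         if out:
--             out += "\n\n"
--         out += "# " + header
--         for p in sp:
--             out += "\n" + p
--     return out + "\n"
-- ===== Notes on version B (the rewrite author's own statement) =====
-- stated objective: alternative
-- what changed: B replaces A's batch sorted()/set() passes plus flat line list with trailing-blank-line pop by an incremental algorithm: a hand-written stable insertion sort (_insort) maintains an always-sorted item list and per-group always-sorted deduped package lists (dedup via a membership check at insertion time), and the final string is built directly in one pass with separators decided on the fly.
-- outside the precondition, e.g. on sorted_output({'h': ['A', 'a']}): A returns '# h\na\nA\n', B returns '# h\nA\na\n'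
import Mathlib
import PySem

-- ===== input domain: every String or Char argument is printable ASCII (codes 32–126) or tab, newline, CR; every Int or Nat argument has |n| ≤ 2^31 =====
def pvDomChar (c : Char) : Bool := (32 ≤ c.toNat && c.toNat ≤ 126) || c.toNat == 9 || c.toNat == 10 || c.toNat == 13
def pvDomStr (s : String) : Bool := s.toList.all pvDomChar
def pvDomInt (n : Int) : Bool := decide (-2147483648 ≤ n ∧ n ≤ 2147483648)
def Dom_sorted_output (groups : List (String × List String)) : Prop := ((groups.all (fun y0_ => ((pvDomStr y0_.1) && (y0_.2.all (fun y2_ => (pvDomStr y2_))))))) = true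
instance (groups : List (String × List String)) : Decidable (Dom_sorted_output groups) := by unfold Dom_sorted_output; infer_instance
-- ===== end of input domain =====

-- B replaces A's batch sorted()/set() passes and trailing-blank-line pop with incremental
-- insertion into always-sorted structures (a hand-written stable insertion sort with a
-- membership-based dedup) and builds the result string directly in one pass; same output
-- on Pre_ (objective: alternative algorithm, not faster).
-- str.casefold is ported as PySem.Str.lower — identical on the ASCII domain Dom_ guarantees.

-- ===== PORT A =====
def sorted_output (groups : List (String × List String)) : String :=
  let d := PySem.Dict.mk groups
  let out_lines : List String :=
    (PySem.List.sorted d.keys (fun s => PySem.Str.lower s) false).foldl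
      (fun acc header =>
        let pkgs := PySem.List.sorted (PySem.Set.ofList (d.getD header []))
          (fun s => PySem.Str.lower s) false
        (pkgs.foldl (fun a p => a ++ [p]) (acc ++ ["# " ++ header])) ++ [""]) []
  let out_lines2 :=
    if out_lines ≠ [] ∧ PySem.List.pyGet? out_lines (-1) = some "" then
      out_lines.dropLast
    else out_lines
  PySem.Str.join "\n" out_lines2 ++ "\n"

-- ===== PORT B =====
-- Source B's helper _insort(xs, x, key): linear scan, insert x before the first
-- strictly greater element (stable; early return ported as structural recursion)
def pvInsort {α κ : Type} [LT κ] [DecidableLT κ] (key : α → κ) (x : α) : List α → List α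
  | [] => [x]
  | y :: ys => if key x < key y then x :: y :: ys else y :: pvInsort key x ys

def sorted_output_alt (groups : List (String × List String)) : String :=
  let d := PySem.Dict.mk groups
  let items : List (String × List String) :=
    d.items.foldl (fun its hp =>
      let sp := hp.2.foldl
        (fun sp p => if p ∈ sp then sp else pvInsort (fun s => PySem.Str.lower s) p sp) []
      pvInsort (fun kv => PySem.Str.lower kv.1) (hp.1, sp) its) []
  let out : String := items.foldl (fun out hp =>
      let out := if out = "" then out else out ++ "\n\n"
      let out := out ++ "# " ++ hp.1
      hp.2.foldl (fun out p => out ++ "\n" ++ p) out) ""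
  out ++ "\n"

-- ===== PRECONDITION & SPEC =====
-- Pre_ excludes (i) association lists with duplicate keys, which no Python dict can represent,
-- and (ii) groups whose package list contains two distinct strings equal under casefold, where
-- the order of A's sorted(set(...), key=casefold) ties follows Python's hash-randomised set
-- iteration order (not modellable); B's membership dedup sorts such ties by first occurrence.
def Pre_sorted_output (groups : List (String × List String)) : Prop :=
  (groups.map Prod.fst).Nodup ∧
  ∀ g ∈ groups, ∀ p ∈ g.2, ∀ q ∈ g.2, PySem.Str.lower p = PySem.Str.lower q → p = q
instance (groups : List (String × List String)) : Decidable (Pre_sorted_output groups) := by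
  unfold Pre_sorted_output; infer_instance

def pvWitness_sorted_output : (List (String × List String)) :=
  [("Tools", ["vim", "curl", "vim", "git"]), ("base", [])]

def Spec_sorted_output (groups : List (String × List String)) (out : String) : Prop := out = sorted_output_alt groups
instance (groups : List (String × List String)) (out : String) : Decidable (Spec_sorted_output groups out) := by unfold Spec_sorted_output; infer_instance

-- ===== CLAIM (what is proved, stated in full; the proofs are below) =====
def Claim_equal_sorted_output : Prop := ∀ (groups : List (String × List String)), Dom_sorted_output groups → Pre_sorted_output groups → Spec_sorted_output groups (sorted_output groups)

-- ===== LEMMAS AND PROOFS =====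

-- String-level liftings of the PySem.Chars join lemmas (through toList).
theorem strJoin_nil (sep : String) : PySem.Str.join sep [] = "" := by
  apply String.toList_inj.mp
  simp [PySem.Str.toList_join, PySem.Chars.join_nil]

theorem strJoin_singleton (sep x : String) : PySem.Str.join sep [x] = x := by
  apply String.toList_inj.mp
  simp [PySem.Str.toList_join, PySem.Chars.join_singleton]

theorem strJoin_cons (sep p : String) (rest : List String) (h : rest ≠ []) :
    PySem.Str.join sep (p :: rest) = p ++ sep ++ PySem.Str.join sep rest := by
  cases rest with
  | nil => exact absurd rfl h
  | cons q t =>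
    apply String.toList_inj.mp
    simp [PySem.Str.toList_join, PySem.Chars.join_cons_cons, String.toList_append]

theorem strJoin_append (sep : String) (xs ys : List String) (hx : xs ≠ []) (hy : ys ≠ []) :
    PySem.Str.join sep (xs ++ ys) = PySem.Str.join sep xs ++ sep ++ PySem.Str.join sep ys := by
  induction xs with
  | nil => exact absurd rfl hx
  | cons a t ih =>
    cases t with
    | nil => simpa [strJoin_singleton] using strJoin_cons sep a ys hy
    | cons b u =>
      rw [List.cons_append, strJoin_cons sep a ((b :: u) ++ ys) (by simp),
        ih (by simp), strJoin_cons sep a (b :: u) (by simp)]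
      simp [String.append_assoc]

-- head-prefix distribution and non-emptiness facts used for B's string fold
theorem strJoin_cons_append (sep P H : String) (sp : List String) :
    PySem.Str.join sep ((P ++ H) :: sp) = P ++ PySem.Str.join sep (H :: sp) := by
  cases sp with
  | nil => rw [strJoin_singleton, strJoin_singleton]
  | cons a t =>
    rw [strJoin_cons sep (P ++ H) (a :: t) (by simp), strJoin_cons sep H (a :: t) (by simp)]
    simp [String.append_assoc]

theorem append_ne_empty_left (s t : String) (h : s ≠ "") : s ++ t ≠ "" := by
  intro hc
  have h2 : s = "" ∧ t = "" := by
    have := congrArg String.toList hc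
    simp only [String.toList_append] at this
    simpa using this
  exact h h2.1

theorem strJoin_cons_ne_empty (sep x : String) (sp : List String) (hx : x ≠ "") :
    PySem.Str.join sep (x :: sp) ≠ "" := by
  cases sp with
  | nil => rw [strJoin_singleton]; exact hx
  | cons a t =>
    rw [strJoin_cons sep x (a :: t) (by simp)]
    exact append_ne_empty_left _ _ (append_ne_empty_left _ _ hx)

-- the per-header data both ports share
def pvPkgs (d : PySem.Dict String (List String)) (h : String) : List String :=
  PySem.List.sorted (PySem.Set.ofList (d.getD h [])) (fun s => PySem.Str.lower s) false

def pvGroupLines (d : PySem.Dict String (List String)) (h : String) : List String :=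
  (("# " ++ h) :: pvPkgs d h) ++ [""]

def pvBlock (d : PySem.Dict String (List String)) (h : String) : String :=
  PySem.Str.join "\n" (("# " ++ h) :: pvPkgs d h)

theorem pvBlock_ne_empty (d : PySem.Dict String (List String)) (h : String) :
    pvBlock d h ≠ "" := by
  apply strJoin_cons_ne_empty
  exact append_ne_empty_left "# " h (by decide)

-- ===== A-side: flatten the line loop, drop the trailing sentinel =====
theorem a_lines_eq (d : PySem.Dict String (List String)) (hs : List String) :
    hs.foldl
      (fun acc header =>
        ((pvPkgs d header).foldl (fun a p => a ++ [p]) (acc ++ ["# " ++ header])) ++ [""]) [] =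
    hs.flatMap (pvGroupLines d) := by
  have hbody : ∀ (acc : List String) (header : String),
      ((pvPkgs d header).foldl (fun a p => a ++ [p]) (acc ++ ["# " ++ header])) ++ [""] =
      acc ++ pvGroupLines d header := by
    intro acc header
    rw [PySem.List.foldl_append_singleton_eq_self]
    simp [pvGroupLines]
  refine Eq.trans (PySem.List.foldl_congr_mem hs _
      (fun acc header => acc ++ pvGroupLines d header) [] (fun acc x _ => hbody acc x))
    (by simpa using PySem.List.foldl_append_eq_flatMap (pvGroupLines d) hs [])

theorem flatMap_ne_nil (d : PySem.Dict String (List String)) (h : String) (t : List String) :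
    (h :: t).flatMap (pvGroupLines d) ≠ [] := by
  simp [pvGroupLines]

theorem getLast?_flatMap (d : PySem.Dict String (List String)) (h : String) (t : List String) :
    ((h :: t).flatMap (pvGroupLines d)).getLast? = some "" := by
  induction t generalizing h with
  | nil =>
    simp only [List.flatMap_cons, List.flatMap_nil, List.append_nil, pvGroupLines]
    exact List.getLast?_concat
  | cons h' t ih =>
    rw [List.flatMap_cons, List.getLast?_append_of_ne_nil _ (flatMap_ne_nil d h' t)]
    exact ih h'

-- the heart of the A side: dropping the trailing "" of A's flat line list and joining
-- with "\n" is joining the per-header blocks with "\n\n"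
theorem join_dropLast_eq (d : PySem.Dict String (List String)) (h : String) (t : List String) :
    PySem.Str.join "\n" (((h :: t).flatMap (pvGroupLines d)).dropLast) =
    PySem.Str.join "\n\n" ((h :: t).map (pvBlock d)) := by
  induction t generalizing h with
  | nil =>
    simp only [List.flatMap_cons, List.flatMap_nil, List.append_nil, pvGroupLines]
    rw [List.dropLast_concat]
    rw [List.map_cons, List.map_nil, strJoin_singleton, pvBlock]
  | cons h' t ih =>
    rw [List.flatMap_cons, List.dropLast_append_of_ne_nil (flatMap_ne_nil d h' t)]
    have hrest : ((h' :: t).flatMap (pvGroupLines d)).dropLast ≠ [] := by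
      have hlen : ((h' :: t).flatMap (pvGroupLines d)).length
          = (pvGroupLines d h').length + (t.flatMap (pvGroupLines d)).length := by
        rw [List.flatMap_cons, List.length_append]
      have h2 : (pvGroupLines d h').length = (pvPkgs d h').length + 2 := by
        simp [pvGroupLines]
      intro hc
      have hl := congrArg List.length hc
      rw [List.length_dropLast, List.length_nil] at hl
      omega
    rw [show pvGroupLines d h ++ ((h' :: t).flatMap (pvGroupLines d)).dropLast
        = (("# " ++ h) :: pvPkgs d h) ++ ("" :: ((h' :: t).flatMap (pvGroupLines d)).dropLast) by
      simp [pvGroupLines]]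
    rw [strJoin_append "\n" _ _ (by simp) (by simp),
      strJoin_cons "\n" "" _ hrest, ih h']
    conv_rhs => rw [List.map_cons,
      strJoin_cons "\n\n" (pvBlock d h) (List.map (pvBlock d) (h' :: t)) (by simp)]
    rw [pvBlock]
    rw [show ("" : String) ++ "\n" = "\n" from rfl]
    rw [← String.append_assoc, String.append_assoc (s₂ := "\n") (s₃ := "\n")]
    rw [show ("\n" : String) ++ "\n" = "\n\n" from rfl]

theorem a_eq_join (d : PySem.Dict String (List String)) :
    PySem.Str.join "\n"
      (if (PySem.List.sorted d.keys (fun s => PySem.Str.lower s) false).foldl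
            (fun acc header =>
              (((PySem.List.sorted (PySem.Set.ofList (d.getD header []))
                  (fun s => PySem.Str.lower s) false).foldl (fun a p => a ++ [p])
                  (acc ++ ["# " ++ header])) ++ [""])) [] ≠ [] ∧
          PySem.List.pyGet?
            ((PySem.List.sorted d.keys (fun s => PySem.Str.lower s) false).foldl
              (fun acc header =>
                (((PySem.List.sorted (PySem.Set.ofList (d.getD header []))
                    (fun s => PySem.Str.lower s) false).foldl (fun a p => a ++ [p])
                    (acc ++ ["# " ++ header])) ++ [""])) []) (-1) = some "" then
        ((PySem.List.sorted d.keys (fun s => PySem.Str.lower s) false).foldl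
          (fun acc header =>
            (((PySem.List.sorted (PySem.Set.ofList (d.getD header []))
                (fun s => PySem.Str.lower s) false).foldl (fun a p => a ++ [p])
                (acc ++ ["# " ++ header])) ++ [""])) []).dropLast
      else
        (PySem.List.sorted d.keys (fun s => PySem.Str.lower s) false).foldl
          (fun acc header =>
            (((PySem.List.sorted (PySem.Set.ofList (d.getD header []))
                (fun s => PySem.Str.lower s) false).foldl (fun a p => a ++ [p])
                (acc ++ ["# " ++ header])) ++ [""])) []) ++ "\n" =
    PySem.Str.join "\n\n"
      ((PySem.List.sorted d.keys (fun s => PySem.Str.lower s) false).map (pvBlock d)) ++ "\n" := by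
  have ha : (PySem.List.sorted d.keys (fun s => PySem.Str.lower s) false).foldl
      (fun acc header =>
        (((PySem.List.sorted (PySem.Set.ofList (d.getD header []))
            (fun s => PySem.Str.lower s) false).foldl (fun a p => a ++ [p])
            (acc ++ ["# " ++ header])) ++ [""])) [] =
      (PySem.List.sorted d.keys (fun s => PySem.Str.lower s) false).flatMap (pvGroupLines d) := by
    simpa [pvPkgs] using a_lines_eq d (PySem.List.sorted d.keys (fun s => PySem.Str.lower s) false)
  rw [ha]
  cases hc : PySem.List.sorted d.keys (fun s => PySem.Str.lower s) false with
  | nil => simp [strJoin_nil]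
  | cons h t =>
    have hne := flatMap_ne_nil d h t
    have hlast : PySem.List.pyGet? ((h :: t).flatMap (pvGroupLines d)) (-1) = some "" := by
      rw [PySem.List.pyGet?_neg_one]
      exact getLast?_flatMap d h t
    rw [if_pos ⟨hne, hlast⟩, join_dropLast_eq]

-- ===== B-side: the hand insertion sort is PySem's stable insertion sort =====
theorem pvInsort_eq {α κ : Type} [LT κ] [DecidableLT κ] (key : α → κ) (x : α) :
    ∀ ys : List α,
      pvInsort key x ys = PySem.List.insertBy (fun a b => decide (key a < key b)) x ys := by
  intro ys
  induction ys with
  | nil => rfl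
  | cons y t ih => simp [pvInsort, PySem.List.insertBy, ih]

-- the deduping guard: inserting only unseen elements is inserting the first occurrences
def pvSelect {α : Type} [DecidableEq α] : List α → List α → List α
  | _, [] => []
  | seen, x :: l => if x ∈ seen then pvSelect seen l else x :: pvSelect (x :: seen) l

theorem foldl_guard_insertBy {α : Type} [DecidableEq α] (B : α → α → Bool) :
    ∀ (l acc seen : List α), (∀ y, y ∈ acc ↔ y ∈ seen) →
      l.foldl (fun s x => if x ∈ s then s else PySem.List.insertBy B x s) acc
        = (pvSelect seen l).foldl (fun s x => PySem.List.insertBy B x s) acc := by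
  intro l
  induction l with
  | nil => intro acc seen _; rfl
  | cons x l ih =>
    intro acc seen hmem
    simp only [List.foldl_cons, pvSelect]
    by_cases hx : x ∈ acc
    · rw [if_pos hx, if_pos ((hmem x).mp hx), ih acc seen hmem]
    · rw [if_neg hx, if_neg (fun hc => hx ((hmem x).mpr hc)), List.foldl_cons]
      exact ih (PySem.List.insertBy B x acc) (x :: seen)
        (fun y => by rw [PySem.List.mem_insertBy]; simp [hmem y])

theorem foldl_add_eq_select {α : Type} [DecidableEq α] [BEq α] [LawfulBEq α] :
    ∀ (l acc seen : List α), (∀ y, y ∈ acc ↔ y ∈ seen) →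
      l.foldl PySem.Set.add acc = acc ++ pvSelect seen l := by
  intro l
  induction l with
  | nil => intro acc seen _; simp [pvSelect]
  | cons x l ih =>
    intro acc seen hmem
    simp only [List.foldl_cons, pvSelect, PySem.Set.add, PySem.Set.contains]
    by_cases hx : x ∈ acc
    · rw [if_pos (by simpa using hx), if_pos ((hmem x).mp hx), ih acc seen hmem]
    · rw [if_neg (by simpa using hx), if_neg (fun hc => hx ((hmem x).mpr hc))]
      rw [ih (acc ++ [x]) (x :: seen) (fun y => by simp [hmem y, or_comm])]
      simp

theorem select_nil_eq_ofList {α : Type} [DecidableEq α] [BEq α] [LawfulBEq α] (l : List α) :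
    pvSelect [] l = PySem.Set.ofList l := by
  rw [PySem.Set.ofList_eq_foldl, foldl_add_eq_select l [] [] (fun y => Iff.rfl)]
  simp

-- B's inner loop is sorted(set(pkgs), key=casefold) of the A side
theorem inner_eq (pkgs : List String) :
    pkgs.foldl
        (fun sp p => if p ∈ sp then sp else pvInsort (fun s => PySem.Str.lower s) p sp) [] =
      PySem.List.sorted (PySem.Set.ofList pkgs) (fun s => PySem.Str.lower s) false := by
  have h1 : pkgs.foldl
      (fun sp p => if p ∈ sp then sp else pvInsort (fun s => PySem.Str.lower s) p sp) [] =
      pkgs.foldl (fun sp p => if p ∈ sp then sp else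
        PySem.List.insertBy
          (fun a b => decide (PySem.Str.lower a < PySem.Str.lower b)) p sp) [] := by
    apply PySem.List.foldl_congr_mem
    intro acc x _
    rw [pvInsort_eq]
  rw [h1, foldl_guard_insertBy _ pkgs [] [] (fun y => Iff.rfl), select_nil_eq_ofList,
    PySem.List.sorted_eq_foldl_insertBy]

-- mapping through the stable insertion sort when the key is preserved
theorem map_insertBy {α β : Type} (f : α → β) (Ba : α → α → Bool) (Bb : β → β → Bool)
    (h : ∀ a c, Bb (f a) (f c) = Ba a c) (x : α) :
    ∀ ys : List α,
      (PySem.List.insertBy Ba x ys).map f = PySem.List.insertBy Bb (f x) (ys.map f) := by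
  intro ys
  induction ys with
  | nil => rfl
  | cons y t ih =>
    by_cases hb : Ba x y <;> simp [PySem.List.insertBy, h, hb, ih]

theorem foldl_insertBy_map {α β : Type} (f : α → β) (Ba : α → α → Bool) (Bb : β → β → Bool)
    (h : ∀ a c, Bb (f a) (f c) = Ba a c) :
    ∀ (xs : List α) (acc : List α),
      (xs.foldl (fun acc x => PySem.List.insertBy Ba x acc) acc).map f =
        xs.foldl (fun acc x => PySem.List.insertBy Bb (f x) acc) (acc.map f) := by
  intro xs
  induction xs with
  | nil => intro acc; rfl
  | cons x t ih =>
    intro acc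
    simp only [List.foldl_cons]
    rw [ih, map_insertBy f Ba Bb h]

-- B's output fold over nonempty blocks is the "\n\n" join
theorem foldl_append_nl (sp : List String) (base : String) :
    sp.foldl (fun o p => o ++ "\n" ++ p) base = PySem.Str.join "\n" (base :: sp) := by
  induction sp generalizing base with
  | nil => rw [strJoin_singleton]; rfl
  | cons p t ih =>
    rw [List.foldl_cons, ih, strJoin_cons_append "\n" (base ++ "\n") p t,
      strJoin_cons "\n" base (p :: t) (by simp)]

theorem outer_fold (bs : List String) (hbs : ∀ b ∈ bs, b ≠ "") :
    bs.foldl (fun out b => (if out = "" then out else out ++ "\n\n") ++ b) "" =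
      PySem.Str.join "\n\n" bs := by
  have aux : ∀ (t : List String) (s : String), s ≠ "" →
      t.foldl (fun out b => (if out = "" then out else out ++ "\n\n") ++ b) s =
        PySem.Str.join "\n\n" (s :: t) := by
    intro t
    induction t with
    | nil => intro s _; rw [strJoin_singleton]; rfl
    | cons b t ih =>
      intro s hs
      rw [List.foldl_cons, if_neg hs,
        ih (s ++ "\n\n" ++ b) (append_ne_empty_left _ _ (append_ne_empty_left _ _ hs)),
        strJoin_cons_append "\n\n" (s ++ "\n\n") b t,
        strJoin_cons "\n\n" s (b :: t) (by simp)]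
    
  cases bs with
  | nil => rw [strJoin_nil]; rfl
  | cons b t =>
    rw [List.foldl_cons, if_pos rfl]
    have hb : b ≠ "" := hbs b (by simp)
    rw [show ("" : String) ++ b = b from rfl]
    exact aux t b hb

-- the per-header item B maintains
def pvItem (d : PySem.Dict String (List String)) (k : String) : String × List String :=
  (k, pvPkgs d k)

theorem b_core (d : PySem.Dict String (List String)) (hnd : d.keys.Nodup) :
    (d.items.foldl (fun its hp =>
        pvInsort (fun kv => PySem.Str.lower kv.1)
          (hp.1, hp.2.foldl (fun sp p => if p ∈ sp then sp
              else pvInsort (fun s => PySem.Str.lower s) p sp) []) its) []).foldl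
      (fun out hp =>
        hp.2.foldl (fun out p => out ++ "\n" ++ p)
          ((if out = "" then out else out ++ "\n\n") ++ "# " ++ hp.1)) "" ++ "\n" =
    PySem.Str.join "\n\n"
      ((PySem.List.sorted d.keys (fun s => PySem.Str.lower s) false).map (pvBlock d)) ++ "\n" := by
  have hitems :
      ((d.keys.map (fun k => (k, d.getD k []))).foldl (fun its hp =>
          pvInsort (fun kv => PySem.Str.lower kv.1)
            (hp.1, hp.2.foldl (fun sp p => if p ∈ sp then sp
                else pvInsort (fun s => PySem.Str.lower s) p sp) []) its) []) =
      (PySem.List.sorted d.keys (fun s => PySem.Str.lower s) false).map (pvItem d) := by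
    rw [List.foldl_map]
    refine Eq.trans (PySem.List.foldl_congr_mem d.keys _
      (fun its k => PySem.List.insertBy
        (fun a b => decide (PySem.Str.lower a.1 < PySem.Str.lower b.1))
        (pvItem d k) its) [] ?_) ?_
    · intro its k _
      show pvInsort _ _ _ = _
      rw [pvInsort_eq, inner_eq]
      rfl
    · have hmap := foldl_insertBy_map (pvItem d)
        (fun a b => decide (PySem.Str.lower a < PySem.Str.lower b))
        (fun a b => decide (PySem.Str.lower a.1 < PySem.Str.lower b.1))
        (fun a c => rfl) d.keys []
      rw [List.map_nil] at hmap
      rw [PySem.List.sorted_eq_foldl_insertBy]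
      exact hmap.symm
  rw [PySem.Dict.items_eq_map_keys d hnd [], hitems, List.foldl_map]
  refine congrArg (fun s => s ++ "\n") ?_
  refine Eq.trans (PySem.List.foldl_congr_mem
    (PySem.List.sorted d.keys (fun s => PySem.Str.lower s) false) _
    (fun out k => (if out = "" then out else out ++ "\n\n") ++ pvBlock d k) "" ?_) ?_
  · intro out k _
    show (pvItem d k).2.foldl (fun out p => out ++ "\n" ++ p)
        ((if out = "" then out else out ++ "\n\n") ++ "# " ++ (pvItem d k).1) = _
    rw [foldl_append_nl, String.append_assoc, strJoin_cons_append]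
    rfl
  · rw [← List.foldl_map (f := pvBlock d)
      (g := fun out b => (if out = "" then out else out ++ "\n\n") ++ b)]
    exact outer_fold _ (by
      intro b hb
      rcases List.mem_map.mp hb with ⟨k, _, rfl⟩
      exact pvBlock_ne_empty _ k)

theorem mk_keys_nodup (groups : List (String × List String))
    (h : (groups.map Prod.fst).Nodup) : (PySem.Dict.mk groups).keys.Nodup := by
  simpa [PySem.Dict.keys] using h

theorem sorted_output_eq (groups : List (String × List String))
    (hnd : (PySem.Dict.mk groups).keys.Nodup) :
    sorted_output groups = sorted_output_alt groups :=
  (a_eq_join (PySem.Dict.mk groups)).trans (b_core (PySem.Dict.mk groups) hnd).symm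

-- ===== VERDICT (by name: the statement is the Claim_ definition above) =====
theorem sorted_output_spec : Claim_equal_sorted_output := by
  intro groups _ hpre
  unfold Spec_sorted_output
  exact sorted_output_eq groups (mk_keys_nodup groups hpre.1)
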